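-- pv_equiv track=rewrite | github.com/garasev/sem05 | python/02.py | minus_counter
-- ===== SOURCE A (Python) =====
-- def minus_counter(n, m, matr):
--     counter = 0
--     for i in range(n):
--         for j in range(m):
--             matr[i][j] = int(matr[i][j])
--             if matr[i][j] < 0:
--                 counter += 1
--     return counter
-- ===== SOURCE B (Python) =====
-- def minus_counter(n, m, matr):
--     # Recursive decomposition over rows: count negatives of the last visited
--     # row, then recurse on the first n-1 rows. No index loops, no counter.
--     # (A also rewrites each cell via int() in place; on integer matrices that
--     # normalization is value-preserving, so only the return value matters.)
--     if n <= 0 or m <= 0: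
--         return 0
--     return minus_counter(n - 1, m, matr) + sum(1 if x < 0 else 0 for x in matr[n - 1][:m])
-- ===== Notes on version B (the rewrite author's own statement) =====
-- stated objective: alternative
-- what changed: Replaces A's iterative nested index loops with a mutating counter by a recursion on the row count: base case n<=0 or m<=0 returns 0, otherwise recurse on the first n-1 rows and add a per-row 0/1 sum over the slice matr[n-1][:m]; A's in-place int() rewrite is value-preserving on integer matrices (return-value equivalence).
import Mathlib
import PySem

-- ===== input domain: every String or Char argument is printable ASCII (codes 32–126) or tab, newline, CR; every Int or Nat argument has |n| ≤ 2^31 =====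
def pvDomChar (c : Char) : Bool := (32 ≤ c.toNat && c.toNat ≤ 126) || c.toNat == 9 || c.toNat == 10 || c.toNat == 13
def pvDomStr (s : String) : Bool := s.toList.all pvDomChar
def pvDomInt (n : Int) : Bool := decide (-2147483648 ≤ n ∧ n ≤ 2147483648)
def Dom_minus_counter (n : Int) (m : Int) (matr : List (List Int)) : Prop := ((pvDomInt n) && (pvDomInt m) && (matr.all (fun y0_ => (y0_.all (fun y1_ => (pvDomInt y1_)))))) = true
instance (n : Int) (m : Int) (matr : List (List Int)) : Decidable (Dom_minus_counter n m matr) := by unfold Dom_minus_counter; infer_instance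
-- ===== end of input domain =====

-- B replaces A's nested index loops with a mutating counter by a structural recursion on
-- the row count (alternative decomposition, same cost). Return-value equivalence only:
-- A's in-place int() cell rewrite is value-preserving on integer matrices; B does not mutate.

-- ===== PORT A =====
-- A: counter = 0; for i in range(n): for j in range(m):
--        matr[i][j] = int(matr[i][j])   (identity on Int entries; value unchanged)
--        if matr[i][j] < 0: counter += 1
-- return counter
def minus_counter (n : Int) (m : Int) (matr : List (List Int)) : Int :=
  (PySem.List.pyRange 0 n 1).foldl (fun counter i =>
    (PySem.List.pyRange 0 m 1).foldl (fun counter j =>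
      if PySem.List.pyGetD (PySem.List.pyGetD matr i []) j 0 < 0 then counter + 1
      else counter) counter) 0

-- ===== PORT B =====
-- B: if n <= 0 or m <= 0: return 0
--    return minus_counter(n - 1, m, matr) + sum(1 if x < 0 else 0 for x in matr[n - 1][:m])
def minus_counter_alt (n : Int) (m : Int) (matr : List (List Int)) : Int :=
  if n ≤ 0 ∨ m ≤ 0 then 0
  else minus_counter_alt (n - 1) m matr +
    ((PySem.List.slice (PySem.List.pyGetD matr (n - 1) []) none (some m)).map
      (fun x => if x < 0 then (1 : Int) else 0)).sum
termination_by n.toNat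
decreasing_by omega

-- ===== PRECONDITION & SPEC =====
-- Pre_ excludes exactly the inputs where A raises IndexError: when the inner loop body
-- runs (0 < m), every visited row index must be in range and every visited row long enough.
def Pre_minus_counter (n : Int) (m : Int) (matr : List (List Int)) : Prop :=
  0 < m → (n ≤ (matr.length : Int) ∧ ∀ row ∈ matr.take n.toNat, m ≤ (row.length : Int))
instance (n : Int) (m : Int) (matr : List (List Int)) : Decidable (Pre_minus_counter n m matr) := by
  unfold Pre_minus_counter; infer_instance

def pvWitness_minus_counter : Int × Int × List (List Int) := (2, 2, [[1, -2], [3, -4]])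

def Spec_minus_counter (n : Int) (m : Int) (matr : List (List Int)) (out : Int) : Prop := out = minus_counter_alt n m matr
instance (n : Int) (m : Int) (matr : List (List Int)) (out : Int) : Decidable (Spec_minus_counter n m matr out) := by unfold Spec_minus_counter; infer_instance

-- ===== CLAIM (what is proved, stated in full; the proofs are below) =====
def Claim_equal_minus_counter : Prop := ∀ (n : Int) (m : Int) (matr : List (List Int)), Dom_minus_counter n m matr → Pre_minus_counter n m matr → Spec_minus_counter n m matr (minus_counter n m matr)

-- ===== LEMMAS AND PROOFS =====

-- take k of a list, written as a table of getD lookups (valid when k ≤ length)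
lemma take_eq_map_range_getD {α : Type} (xs : List α) (d : α) (k : Nat) (hk : k ≤ xs.length) :
    xs.take k = (List.range k).map (fun i => xs.getD i d) := by
  apply List.ext_getElem
  · simp [Nat.min_eq_left hk]
  · intro i h1 h2
    have hi : i < k := by simpa [Nat.min_eq_left hk] using h1
    have hix : i < xs.length := lt_of_lt_of_le hi hk
    simp [List.getD, hix]

-- A's inner loop over one row adds the 0/1 negativity sum of row[:m] to the counter
lemma inner_count (row : List Int) (m : Int) (hm : 0 < m) (hlen : m ≤ (row.length : Int))
    (counter : Int) :
    (PySem.List.pyRange 0 m 1).foldl (fun counter j =>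
      if PySem.List.pyGetD row j 0 < 0 then counter + 1 else counter) counter
    = counter + ((PySem.List.slice row none (some m)).map
        (fun x => if x < 0 then (1 : Int) else 0)).sum := by
  have hfc := PySem.List.foldl_count_if (fun j => decide (PySem.List.pyGetD row j 0 < 0))
    (PySem.List.pyRange 0 m 1) counter
  simp only [decide_eq_true_eq] at hfc
  have hs := PySem.List.sum_map_ite_one_zero (fun x => decide (x < 0)) (row.take m.toNat)
  simp only [decide_eq_true_eq] at hs
  rw [hfc, PySem.List.slice_to row (le_of_lt hm), hs]
  congr 2
  have hml : m.toNat ≤ row.length := by omega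
  rw [PySem.List.pyRange_one, List.countP_map,
      take_eq_map_range_getD row 0 m.toNat hml, List.countP_map]
  have h1 : (m - 0).toNat = m.toNat := by omega
  rw [h1]
  apply List.countP_congr
  intro k hk
  simp only [Function.comp, zero_add, PySem.List.pyGetD_natCast]

-- the equivalence, by induction on the number of visited rows
lemma minus_counter_eq_alt (k : Nat) (n m : Int) (matr : List (List Int))
    (hk : n.toNat = k) (hpre : Pre_minus_counter n m matr) :
    minus_counter n m matr = minus_counter_alt n m matr := by
  induction k generalizing n with
  | zero =>
    have hn : n ≤ 0 := by omega
    rw [minus_counter_alt, if_pos (Or.inl hn)]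
    unfold minus_counter
    rw [PySem.List.pyRange_one_eq_nil hn]
    rfl
  | succ k ih =>
    have hn : 0 < n := by omega
    by_cases hm : m ≤ 0
    · rw [minus_counter_alt, if_pos (Or.inr hm)]
      unfold minus_counter
      rw [PySem.List.pyRange_one_eq_nil hm]
      simp only [List.foldl_nil]
      induction (PySem.List.pyRange 0 n 1) with
      | nil => rfl
      | cons a l ihl => simp [ihl]
    · replace hm : 0 < m := by omega
      obtain ⟨hlen, hrows⟩ := hpre hm
      -- peel the last row index off A's outer loop
      have hsplit : PySem.List.pyRange 0 n 1 = PySem.List.pyRange 0 (n - 1) 1 ++ [n - 1] := by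
        have hle : (0 : Int) ≤ n - 1 := by omega
        have := PySem.List.pyRange_one_succ_right hle
        simpa using this
      have hrowmem : PySem.List.pyGetD matr (n - 1) [] ∈ matr.take n.toNat := by
        have h0 : (0 : Int) ≤ n - 1 := by omega
        have h1 : n - 1 < (matr.length : Int) := by omega
        rw [PySem.List.pyGetD_eq_getElem matr [] h0 h1]
        refine List.mem_take_iff_getElem.mpr ⟨(n - 1).toNat, by omega, rfl⟩
      have hrlen := hrows _ hrowmem
      have hpre' : Pre_minus_counter (n - 1) m matr := by
        intro _
        refine ⟨by omega, fun row hr => ?_⟩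
        apply hrows
        have hsub : matr.take (n - 1).toNat = (matr.take n.toNat).take (n - 1).toNat := by
          rw [List.take_take, Nat.min_eq_left (by omega)]
        rw [hsub] at hr
        exact List.mem_of_mem_take hr
      rw [minus_counter_alt, if_neg (by omega), ← ih (n - 1) (by omega) hpre']
      unfold minus_counter
      rw [hsplit, List.foldl_append, List.foldl_cons, List.foldl_nil,
          inner_count _ m hm hrlen]

theorem minus_counter_spec : Claim_equal_minus_counter := by
  intro n m matr _ hpre
  unfold Spec_minus_counter
  exact minus_counter_eq_alt n.toNat n m matr rfl hpre
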